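-- pv_equiv track=rewrite | github.com/zacernst/pycypher-nmetl | packages/pycypher/src/pycypher/query_formatter.py | _tokenize_preserving_strings
-- ===== SOURCE A (Python) =====
-- def _tokenize_preserving_strings(
--     text: str,
-- ) -> list[tuple[bool, str]]:
--     """Split text into (is_string, content) pairs."""
--     tokens: list[tuple[bool, str]] = []
--     i = 0
--     n = len(text)
--     buf: list[str] = []
--
--     while i < n:
--         ch = text[i]
--         if ch in ("'", '"'):
--             # Flush non-string buffer
--             if buf:
--                 tokens.append((False, "".join(buf)))
--                 buf.clear()
--             # Consume string literal
--             quote = ch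
--             string_buf = [ch]
--             i += 1
--             while i < n:
--                 if text[i] == "\\" and i + 1 < n:
--                     string_buf.append(text[i])
--                     string_buf.append(text[i + 1])
--                     i += 2
--                 elif text[i] == quote:
--                     string_buf.append(text[i])
--                     i += 1
--                     break
--                 else:
--                     string_buf.append(text[i])
--                     i += 1
--             tokens.append((True, "".join(string_buf)))
--         else:
--             buf.append(ch)
--             i += 1
--
--     if buf:
--         tokens.append((False, "".join(buf)))
--
--     return tokens
-- ===== SOURCE B (Python) =====
-- def _take_literal(quote, s):
--     """Return (body, rest): literal body after the opening quote (incl. closing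
--     quote if found), and the text after the literal."""
--     out = []
--     i = 0
--     while i < len(s):
--         c = s[i]
--         if c == "\\" and i + 1 < len(s):
--             out.append(s[i:i + 2])
--             i += 2
--         elif c == quote:
--             out.append(c)
--             return "".join(out), s[i + 1:]
--         else:
--             out.append(c)
--             i += 1
--     return "".join(out), ""
--
--
-- def _tokenize_preserving_strings(
--     text: str,
-- ) -> list[tuple[bool, str]]:
--     """Split text into (is_string, content) pairs.
--
--     Jump-to-next-quote recursion over slices instead of a char-by-char loop."""
--     if not text:
--         return []
--     q = min((i for i in (text.find("'"), text.find('"')) if i >= 0), default=-1)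
--     if q == -1:
--         return [(False, text)]
--     head = [(False, text[:q])] if q else []
--     body, rest = _take_literal(text[q], text[q + 1:])
--     return head + [(True, text[q] + body)] + _tokenize_preserving_strings(rest)
-- ===== Notes on version B (the rewrite author's own statement) =====
-- stated objective: faster
-- what changed: Replaces the char-by-char index loop with mutable buffers by a jump-to-next-quote recursion: find() locates the next quote, the gap is emitted as one slice, a helper slices off the string literal, and the function recurses on the remaining suffix.
import Mathlib
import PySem

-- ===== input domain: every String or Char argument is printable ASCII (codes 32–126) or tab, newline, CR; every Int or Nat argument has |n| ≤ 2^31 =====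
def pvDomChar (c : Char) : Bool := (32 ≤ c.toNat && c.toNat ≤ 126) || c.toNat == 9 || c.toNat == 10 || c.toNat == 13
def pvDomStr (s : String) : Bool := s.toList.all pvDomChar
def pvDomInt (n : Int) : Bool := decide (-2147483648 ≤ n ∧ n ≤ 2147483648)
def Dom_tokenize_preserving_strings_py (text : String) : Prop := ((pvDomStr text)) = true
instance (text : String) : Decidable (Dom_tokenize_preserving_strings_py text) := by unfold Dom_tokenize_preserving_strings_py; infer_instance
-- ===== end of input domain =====

-- B replaces A's char-by-char loop with mutable buffers by a jump-to-next-quote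
-- recursion over slices (objective: alternative; same output on all inputs).

-- ===== PORT A =====
-- inner `while` of A: consume a string literal (opening quote already in sbuf),
-- returning the accumulated literal chars and the remaining text.
def pvConsumeA (quote : Char) (sbuf : List Char) : List Char → List Char × List Char
  | [] => (sbuf, [])
  | [c] =>
    -- i + 1 < n is false here, so the backslash branch cannot fire
    if c = quote then (sbuf ++ [c], []) else (sbuf ++ [c], [])
  | c :: d :: rest =>
    if c = '\\' then pvConsumeA quote (sbuf ++ [c, d]) rest
    else if c = quote then (sbuf ++ [c], d :: rest)
    else pvConsumeA quote (sbuf ++ [c]) (d :: rest)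

theorem pvConsumeA_len_aux (quote : Char) :
    ∀ (n : ℕ) (cs : List Char), cs.length ≤ n → ∀ (sbuf : List Char),
      (pvConsumeA quote sbuf cs).2.length ≤ cs.length := by
  intro n
  induction n with
  | zero =>
    intro cs hlen sbuf
    have : cs = [] := by cases cs <;> simp_all
    subst this; simp [pvConsumeA]
  | succ n ih =>
    intro cs hlen sbuf
    match cs with
    | [] => simp [pvConsumeA]
    | [c] => simp only [pvConsumeA]; split <;> simp
    | c :: d :: rest =>
      simp only [List.length_cons] at hlen ⊢
      simp only [pvConsumeA]
      split
      · have := ih rest (by omega) (sbuf ++ [c, d])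
        omega
      · split
        · simp
        · have := ih (d :: rest) (by simp only [List.length_cons]; omega) (sbuf ++ [c])
          simp only [List.length_cons] at this
          omega

theorem pvConsumeA_len (quote : Char) (sbuf cs : List Char) :
    (pvConsumeA quote sbuf cs).2.length ≤ cs.length :=
  pvConsumeA_len_aux quote cs.length cs le_rfl sbuf

-- outer `while` of A: buf is the pending non-string buffer, acc the tokens list
def pvLoopA (buf : List Char) (acc : List (Bool × String)) : List Char → List (Bool × String)
  | [] => if buf = [] then acc else acc ++ [(false, String.ofList buf)]
  | c :: rest =>
    if c = '\'' ∨ c = '"' then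
      let acc' := if buf = [] then acc else acc ++ [(false, String.ofList buf)]
      let p := pvConsumeA c [c] rest
      pvLoopA [] (acc' ++ [(true, String.ofList p.1)]) p.2
    else
      pvLoopA (buf ++ [c]) acc rest
termination_by cs => cs.length
decreasing_by
  · exact Nat.lt_succ_of_le (pvConsumeA_len _ _ _)
  · simp

def tokenize_preserving_strings_py (text : String) : List (Bool × String) :=
  pvLoopA [] [] text.toList

-- ===== PORT B =====
-- _take_literal of Source B: literal body (incl. closing quote if found) + rest
def pvTakeLitB (quote : Char) : List Char → List Char × List Char
  | [] => ([], [])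
  | [c] =>
    -- i + 1 < len(s) is false here, so the backslash branch cannot fire
    if c = quote then ([c], []) else ([c], [])
  | c :: d :: rest =>
    if c = '\\' then
      let p := pvTakeLitB quote rest
      (c :: d :: p.1, p.2)
    else if c = quote then ([c], d :: rest)
    else
      let p := pvTakeLitB quote (d :: rest)
      (c :: p.1, p.2)

theorem pvTakeLitB_len_aux (quote : Char) :
    ∀ (n : ℕ) (cs : List Char), cs.length ≤ n →
      (pvTakeLitB quote cs).2.length ≤ cs.length := by
  intro n
  induction n with
  | zero =>
    intro cs hlen
    have : cs = [] := by cases cs <;> simp_all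
    subst this; simp [pvTakeLitB]
  | succ n ih =>
    intro cs hlen
    match cs with
    | [] => simp [pvTakeLitB]
    | [c] => simp only [pvTakeLitB]; split <;> simp
    | c :: d :: rest =>
      simp only [List.length_cons] at hlen ⊢
      simp only [pvTakeLitB]
      split
      · have := ih rest (by omega)
        dsimp only
        omega
      · split
        · simp
        · have := ih (d :: rest) (by simp only [List.length_cons]; omega)
          dsimp only
          simp only [List.length_cons] at this
          omega

theorem pvTakeLitB_len (quote : Char) (cs : List Char) :
    (pvTakeLitB quote cs).2.length ≤ cs.length :=
  pvTakeLitB_len_aux quote cs.length cs le_rfl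

-- min of text.find("'") / text.find('"') with the -1 (= none) convention
def pvFindQB (cs : List Char) : Option Nat :=
  match cs.findIdx? (· = '\''), cs.findIdx? (· = '"') with
  | none, none => none
  | some a, none => some a
  | none, some b => some b
  | some a, some b => some (min a b)

def pvTokB : List Char → List (Bool × String)
  | [] => []
  | c :: rest =>
    match h : pvFindQB (c :: rest) with
    | none => [(false, String.ofList (c :: rest))]
    | some q =>
      let head : List (Bool × String) :=
        if q = 0 then [] else [(false, String.ofList ((c :: rest).take q))]
      match h2 : (c :: rest).drop q with
      | [] => []  -- unreachable: q is a valid index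
      | quote :: tail =>
        let p := pvTakeLitB quote tail
        head ++ [(true, String.ofList (quote :: p.1))] ++ pvTokB p.2
termination_by cs => cs.length
decreasing_by
  have h3 : tail.length < (c :: rest).length := by
    have h4 := congrArg List.length h2
    rw [List.length_drop] at h4
    simp only [List.length_cons] at h4 ⊢
    omega
  exact lt_of_le_of_lt (pvTakeLitB_len quote tail) h3

def tokenize_preserving_strings_py_alt (text : String) : List (Bool × String) :=
  pvTokB text.toList

-- ===== PRECONDITION & SPEC =====
def Spec_tokenize_preserving_strings_py (text : String) (out : List (Bool × String)) : Prop := out = tokenize_preserving_strings_py_alt text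
instance (text : String) (out : List (Bool × String)) : Decidable (Spec_tokenize_preserving_strings_py text out) := by unfold Spec_tokenize_preserving_strings_py; infer_instance

-- ===== CLAIM (what is proved, stated in full; the proofs are below) =====
def Claim_equal_tokenize_preserving_strings_py : Prop := ∀ (text : String), Dom_tokenize_preserving_strings_py text → Spec_tokenize_preserving_strings_py text (tokenize_preserving_strings_py text)

-- ===== LEMMAS AND PROOFS =====

-- glue A's pending buffer onto B's token list (B's head gap, if any, absorbs it)
def pvMerge (buf : List Char) (l : List (Bool × String)) : List (Bool × String) :=
  if buf = [] then l else
  match l with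
  | (false, s) :: t => (false, String.ofList (buf ++ s.toList)) :: t
  | _ => (false, String.ofList buf) :: l

theorem pvMerge_nil (l : List (Bool × String)) : pvMerge [] l = l := by
  simp [pvMerge]

theorem pvMerge_empty (buf : List Char) :
    pvMerge buf [] = if buf = [] then [] else [(false, String.ofList buf)] := by
  by_cases hb : buf = [] <;> simp [pvMerge, hb]

theorem pvMerge_gap (buf xs : List Char) (t : List (Bool × String)) :
    pvMerge buf ((false, String.ofList xs) :: t) =
      (false, String.ofList (buf ++ xs)) :: t := by
  by_cases hb : buf = [] <;> simp [pvMerge, hb, String.toList_ofList]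

theorem pvMerge_true (buf : List Char) (s : String) (t : List (Bool × String)) :
    pvMerge buf ((true, s) :: t) =
      (if buf = [] then [] else [(false, String.ofList buf)]) ++ (true, s) :: t := by
  by_cases hb : buf = [] <;> simp [pvMerge, hb]

theorem pvTokB_nil : pvTokB [] = [] := by
  simp only [pvTokB]

theorem pvTokB_none (c : Char) (rest : List Char)
    (h : pvFindQB (c :: rest) = none) :
    pvTokB (c :: rest) = [(false, String.ofList (c :: rest))] := by
  simp only [pvTokB]
  split
  · rfl
  · rename_i q heq
    rw [h] at heq; cases heq

theorem pvTokB_some (c quote : Char) (rest tail : List Char) (q : ℕ)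
    (h : pvFindQB (c :: rest) = some q) (h2 : (c :: rest).drop q = quote :: tail) :
    pvTokB (c :: rest) =
      (if q = 0 then [] else [(false, String.ofList ((c :: rest).take q))]) ++
        [(true, String.ofList (quote :: (pvTakeLitB quote tail).1))] ++
        pvTokB (pvTakeLitB quote tail).2 := by
  simp only [pvTokB]
  split
  · rename_i heq
    rw [h] at heq; cases heq
  · rename_i q' heq
    rw [h] at heq
    obtain rfl : q = q' := Option.some.inj heq
    split
    · rename_i h2'
      rw [h2] at h2'; cases h2'
    · rename_i quote' tail' h2'
      rw [h2] at h2'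
      obtain ⟨h3, h4⟩ := List.cons.inj h2'
      subst h3; subst h4
      rfl

theorem pvConsumeA_eq_aux (quote : Char) :
    ∀ (n : ℕ) (cs : List Char), cs.length ≤ n → ∀ (sbuf : List Char),
      pvConsumeA quote sbuf cs =
        (sbuf ++ (pvTakeLitB quote cs).1, (pvTakeLitB quote cs).2) := by
  intro n
  induction n with
  | zero =>
    intro cs hlen sbuf
    have : cs = [] := by cases cs <;> simp_all
    subst this; simp [pvConsumeA, pvTakeLitB]
  | succ n ih =>
    intro cs hlen sbuf
    match cs with
    | [] => simp [pvConsumeA, pvTakeLitB]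
    | [c] => simp only [pvConsumeA, pvTakeLitB]; split <;> simp
    | c :: d :: rest =>
      simp only [List.length_cons] at hlen
      simp only [pvConsumeA, pvTakeLitB]
      split
      · rw [ih rest (by omega) (sbuf ++ [c, d])]
        simp
      · split
        · simp
        · rw [ih (d :: rest) (by simp only [List.length_cons]; omega) (sbuf ++ [c])]
          simp

theorem pvConsumeA_eq (quote : Char) (sbuf cs : List Char) :
    pvConsumeA quote sbuf cs =
      (sbuf ++ (pvTakeLitB quote cs).1, (pvTakeLitB quote cs).2) :=
  pvConsumeA_eq_aux quote cs.length cs le_rfl sbuf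

theorem pvFindQB_cons_shift (c : Char) (rest : List Char)
    (hc : ¬ (c = '\'' ∨ c = '"')) :
    pvFindQB (c :: rest) = (pvFindQB rest).map (· + 1) := by
  push_neg at hc
  simp only [pvFindQB, List.findIdx?_cons]
  have h1 : (c = '\'') = False := by simp [hc.1]
  have h2 : (c = '"') = False := by simp [hc.2]
  simp only [h1, h2, decide_false]
  cases rest.findIdx? (· = '\'') <;> cases rest.findIdx? (· = '"') <;>
    simp [Option.map]

theorem pvFindQB_quote (c : Char) (rest : List Char)
    (hc : c = '\'' ∨ c = '"') :
    pvFindQB (c :: rest) = some 0 := by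
  simp only [pvFindQB, List.findIdx?_cons]
  rcases hc with h | h <;> subst h <;>
    · simp only [decide_true, if_true]
      cases rest.findIdx? (· = '\'') <;> cases rest.findIdx? (· = '"') <;> simp

theorem pvFindQB_lt_length (cs : List Char) (q : ℕ) (h : pvFindQB cs = some q) :
    q < cs.length := by
  simp only [pvFindQB] at h
  rcases h1 : cs.findIdx? (· = '\'') with _ | a <;>
    rcases h2 : cs.findIdx? (· = '"') with _ | b <;>
      simp only [h1, h2] at h
  · exact absurd h (by simp)
  · have := (List.findIdx?_eq_some_iff_findIdx_eq.mp h2).1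
    obtain rfl : b = q := Option.some.inj h
    omega
  · have := (List.findIdx?_eq_some_iff_findIdx_eq.mp h1).1
    obtain rfl : a = q := Option.some.inj h
    omega
  · have ha := (List.findIdx?_eq_some_iff_findIdx_eq.mp h1).1
    have hb := (List.findIdx?_eq_some_iff_findIdx_eq.mp h2).1
    obtain rfl : min a b = q := Option.some.inj h
    omega

-- B absorbs one more non-quote char into its pending gap
theorem pvTokB_cons (c : Char) (rest : List Char)
    (hc : ¬ (c = '\'' ∨ c = '"')) (buf : List Char) :
    pvMerge buf (pvTokB (c :: rest)) = pvMerge (buf ++ [c]) (pvTokB rest) := by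
  have hshift := pvFindQB_cons_shift c rest hc
  cases hq : pvFindQB rest with
  | none =>
    have hcq : pvFindQB (c :: rest) = none := by rw [hshift, hq]; rfl
    rw [pvTokB_none c rest hcq, pvMerge_gap]
    cases rest with
    | nil =>
      rw [pvTokB_nil, pvMerge_empty]
      simp
    | cons d tail =>
      rw [pvTokB_none d tail hq, pvMerge_gap]
      simp
  | some q =>
    have hcq : pvFindQB (c :: rest) = some (q + 1) := by rw [hshift, hq]; rfl
    have hqlen := pvFindQB_lt_length rest q hq
    cases rest with
    | nil => simp at hqlen
    | cons d tail =>
      cases h2 : (d :: tail).drop q with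
      | nil =>
        exfalso
        have h3 := congrArg List.length h2
        rw [List.length_drop] at h3
        simp only [List.length_cons, List.length_nil] at h3 hqlen
        omega
      | cons quote tail2 =>
        have hdrop : (c :: d :: tail).drop (q + 1) = quote :: tail2 := by
          simpa using h2
        rw [pvTokB_some c quote (d :: tail) tail2 (q + 1) hcq hdrop]
        rw [pvTokB_some d quote tail tail2 q hq h2]
        by_cases hq0 : q = 0
        · subst hq0
          simp only [Nat.add_one_ne_zero, if_false, if_true, List.take_succ_cons,
            List.take_zero, List.nil_append, List.singleton_append, List.cons_append]
          rw [pvMerge_gap, pvMerge_true]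
          simp
        · have h1 : ¬ (q + 1 = 0) := by omega
          simp only [hq0, h1, if_false, List.take_succ_cons, List.singleton_append,
            List.cons_append]
          rw [pvMerge_gap, pvMerge_gap]
          simp

-- main invariant: A's loop = acc ++ (pending buffer glued onto B's result)
theorem pvMain : ∀ (n : ℕ) (cs : List Char), cs.length ≤ n →
    ∀ (buf : List Char) (acc : List (Bool × String)),
      pvLoopA buf acc cs = acc ++ pvMerge buf (pvTokB cs) := by
  intro n
  induction n with
  | zero =>
    intro cs hlen buf acc
    have : cs = [] := by cases cs <;> simp_all
    subst this
    rw [pvTokB_nil, pvMerge_empty]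
    simp only [pvLoopA]
    split <;> simp
  | succ n ih =>
    intro cs hlen buf acc
    cases cs with
    | nil =>
      rw [pvTokB_nil, pvMerge_empty]
      simp only [pvLoopA]
      split <;> simp
    | cons c rest =>
      by_cases hc : c = '\'' ∨ c = '"'
      · -- string-literal branch
        simp only [pvLoopA]
        rw [if_pos hc]
        have hrec :
            pvLoopA [] ((if buf = [] then acc else acc ++ [(false, String.ofList buf)]) ++
                [(true, String.ofList (pvConsumeA c [c] rest).1)]) (pvConsumeA c [c] rest).2 =
            ((if buf = [] then acc else acc ++ [(false, String.ofList buf)]) ++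
                [(true, String.ofList (pvConsumeA c [c] rest).1)]) ++
              pvMerge [] (pvTokB (pvConsumeA c [c] rest).2) := by
          apply ih
          have := pvConsumeA_len c [c] rest
          simp only [List.length_cons] at hlen
          omega
        rw [hrec, pvMerge_nil]
        have hfq := pvFindQB_quote c rest hc
        have hdrop : (c :: rest).drop 0 = c :: rest := rfl
        rw [pvTokB_some c c rest rest 0 hfq hdrop]
        rw [pvConsumeA_eq]
        simp only [if_true, List.nil_append, List.singleton_append]
        rw [pvMerge_true]
        by_cases hb : buf = [] <;> simp [hb]
      · simp only [pvLoopA]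
        rw [if_neg hc]
        rw [ih rest (by simp only [List.length_cons] at hlen; omega) (buf ++ [c]) acc]
        rw [pvTokB_cons c rest hc buf]

-- ===== VERDICT (by name: the statement is the Claim_ definition above) =====
theorem tokenize_preserving_strings_py_spec : Claim_equal_tokenize_preserving_strings_py := by
  intro text _
  unfold Spec_tokenize_preserving_strings_py tokenize_preserving_strings_py
    tokenize_preserving_strings_py_alt
  rw [pvMain text.toList.length text.toList le_rfl [] []]
  rw [pvMerge_nil]
  simp
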